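-- pv_equiv track=rewrite | github.com/alythobani/Project_Euler_Python | 32.py | get_all_possible_multipliers
-- ===== SOURCE A (Python) =====
-- def get_all_possible_multipliers(remaining_digits):
--     """Return all permutations up to 4 digits long from remaining_digits."""
--     all_one_digit_multipliers = []
--     all_two_digit_multipliers = []
--     all_three_digit_multipliers = []
--     all_four_digit_multipliers = []
--     for digit1 in remaining_digits:
--         all_one_digit_multipliers.append(digit1)
--         remaining_digits_copy = remaining_digits[:]
--         remaining_digits_copy.remove(digit1)
--         for digit2 in remaining_digits_copy:
--             all_two_digit_multipliers.append(digit1 * 10 + digit2)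
--             remaining_digits_copy_2 = remaining_digits_copy[:]
--             remaining_digits_copy_2.remove(digit2)
--             for digit3 in remaining_digits_copy_2:
--                 all_three_digit_multipliers.append(
--                     digit1 * 100 + digit2 * 10 + digit3)
--                 remaining_digits_copy_3 = remaining_digits_copy_2[:]
--                 remaining_digits_copy_3.remove(digit3)
--                 for digit4 in remaining_digits_copy_3:
--                     all_four_digit_multipliers.append(
--                         digit1 * 1000 + digit2 * 100 + digit3 * 10 + digit4)
--     return (all_one_digit_multipliers + all_two_digit_multipliers +
--             all_three_digit_multipliers + all_four_digit_multipliers)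
-- ===== SOURCE B (Python) =====
-- def get_all_possible_multipliers(remaining_digits):
--     """Return all permutations up to 4 digits long from remaining_digits."""
--     buckets = [[], [], [], [], []]
--
--     def helper(remaining, current_value, depth):
--         for digit in remaining:
--             new_value = current_value * 10 + digit
--             buckets[depth].append(new_value)
--             if depth < 4:
--                 rem = remaining[:]
--                 rem.remove(digit)
--                 helper(rem, new_value, depth + 1)
--
--     helper(remaining_digits, 0, 1)
--     return buckets[1] + buckets[2] + buckets[3] + buckets[4]
-- ===== Notes on version B (the rewrite author's own statement) =====
-- stated objective: simpler
-- what changed: Replaced the four hardcoded nested for-loops over copied lists with a single recursive DFS helper(remaining, current_value, depth) that appends current_value*10+digit into a depth-indexed bucket and recurses until depth 4.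
import Mathlib
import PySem

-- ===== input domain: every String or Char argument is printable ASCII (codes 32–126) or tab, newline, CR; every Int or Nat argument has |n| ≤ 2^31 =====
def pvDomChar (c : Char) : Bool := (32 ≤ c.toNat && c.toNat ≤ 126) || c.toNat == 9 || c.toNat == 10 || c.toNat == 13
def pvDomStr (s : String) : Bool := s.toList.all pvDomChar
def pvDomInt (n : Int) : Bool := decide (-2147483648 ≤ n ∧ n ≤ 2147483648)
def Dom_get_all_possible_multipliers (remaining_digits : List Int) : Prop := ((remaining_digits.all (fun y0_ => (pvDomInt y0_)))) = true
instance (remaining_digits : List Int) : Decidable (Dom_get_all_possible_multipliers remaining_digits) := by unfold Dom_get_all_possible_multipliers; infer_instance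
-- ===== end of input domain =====

-- B replaces A's four hardcoded nested loops with one recursive DFS helper over depth-indexed buckets (objective: simpler).


-- shared helper: Python's list.remove (first occurrence by value; the raise-on-absent
-- case is unreachable here since the removed element is always drawn from the list)
def pyRemove : List Int → Int → List Int
  | [], _ => []
  | x :: r, d => if x = d then r else x :: pyRemove r d

-- state: the four buckets (one-, two-, three-, four-digit multipliers)
abbrev St := List Int × List Int × List Int × List Int

-- ===== PORT A =====
def get_all_possible_multipliers (remaining_digits : List Int) : List Int :=
  let s : St := remaining_digits.foldl (fun st d1 =>
    let st : St := (st.1 ++ [d1], st.2.1, st.2.2.1, st.2.2.2)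
    let c1 := pyRemove remaining_digits d1
    c1.foldl (fun st d2 =>
      let st : St := (st.1, st.2.1 ++ [d1 * 10 + d2], st.2.2.1, st.2.2.2)
      let c2 := pyRemove c1 d2
      c2.foldl (fun st d3 =>
        let st : St := (st.1, st.2.1, st.2.2.1 ++ [d1 * 100 + d2 * 10 + d3], st.2.2.2)
        let c3 := pyRemove c2 d3
        c3.foldl (fun st d4 =>
          (st.1, st.2.1, st.2.2.1, st.2.2.2 ++ [d1 * 1000 + d2 * 100 + d3 * 10 + d4])) st) st) st)
    ([], [], [], [])
  s.1 ++ s.2.1 ++ s.2.2.1 ++ s.2.2.2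

-- ===== PORT B =====
-- buckets[depth].append(v)
def putB (depth : Nat) (v : Int) (st : St) : St :=
  if depth = 1 then (st.1 ++ [v], st.2.1, st.2.2.1, st.2.2.2)
  else if depth = 2 then (st.1, st.2.1 ++ [v], st.2.2.1, st.2.2.2)
  else if depth = 3 then (st.1, st.2.1, st.2.2.1 ++ [v], st.2.2.2)
  else if depth = 4 then (st.1, st.2.1, st.2.2.1, st.2.2.2 ++ [v])
  else st

def helperB (depth : Nat) (remaining : List Int) (current_value : Int) (st : St) : St :=
  remaining.foldl (fun st digit =>
    let new_value := current_value * 10 + digit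
    let st := putB depth new_value st
    if h : depth < 4 then
      helperB (depth + 1) (pyRemove remaining digit) new_value st
    else st) st
  termination_by 4 - depth
  decreasing_by omega

def get_all_possible_multipliers_alt (remaining_digits : List Int) : List Int :=
  let s := helperB 1 remaining_digits 0 ([], [], [], [])
  s.1 ++ s.2.1 ++ s.2.2.1 ++ s.2.2.2

-- ===== PRECONDITION & SPEC =====
def Spec_get_all_possible_multipliers (remaining_digits : List Int) (out : List Int) : Prop := out = get_all_possible_multipliers_alt remaining_digits
instance (remaining_digits : List Int) (out : List Int) : Decidable (Spec_get_all_possible_multipliers remaining_digits out) := by unfold Spec_get_all_possible_multipliers; infer_instance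

-- ===== CLAIM (what is proved, stated in full; the proofs are below) =====
def Claim_equal_get_all_possible_multipliers : Prop := ∀ (remaining_digits : List Int), Dom_get_all_possible_multipliers remaining_digits → Spec_get_all_possible_multipliers remaining_digits (get_all_possible_multipliers remaining_digits)

-- ===== LEMMAS AND PROOFS =====

theorem helperB4 (rem : List Int) (cur : Int) (st : St) :
    helperB 4 rem cur st = rem.foldl (fun st d => putB 4 (cur * 10 + d) st) st := by
  rw [helperB]
  congr 1

theorem helperB3 (rem : List Int) (cur : Int) (st : St) :
    helperB 3 rem cur st = rem.foldl (fun st d =>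
      helperB 4 (pyRemove rem d) (cur * 10 + d) (putB 3 (cur * 10 + d) st)) st := by
  rw [helperB]
  congr 1

theorem helperB2 (rem : List Int) (cur : Int) (st : St) :
    helperB 2 rem cur st = rem.foldl (fun st d =>
      helperB 3 (pyRemove rem d) (cur * 10 + d) (putB 2 (cur * 10 + d) st)) st := by
  rw [helperB]
  congr 1

theorem helperB1 (rem : List Int) (cur : Int) (st : St) :
    helperB 1 rem cur st = rem.foldl (fun st d =>
      helperB 2 (pyRemove rem d) (cur * 10 + d) (putB 1 (cur * 10 + d) st)) st := by
  rw [helperB]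
  congr 1

theorem fold_eq (rd : List Int) :
    rd.foldl (fun st d1 =>
      let st : St := (st.1 ++ [d1], st.2.1, st.2.2.1, st.2.2.2)
      let c1 := pyRemove rd d1
      c1.foldl (fun st d2 =>
        let st : St := (st.1, st.2.1 ++ [d1 * 10 + d2], st.2.2.1, st.2.2.2)
        let c2 := pyRemove c1 d2
        c2.foldl (fun st d3 =>
          let st : St := (st.1, st.2.1, st.2.2.1 ++ [d1 * 100 + d2 * 10 + d3], st.2.2.2)
          let c3 := pyRemove c2 d3
          c3.foldl (fun st d4 =>
            (st.1, st.2.1, st.2.2.1, st.2.2.2 ++ [d1 * 1000 + d2 * 100 + d3 * 10 + d4])) st) st) st)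
      ([], [], [], [])
    = helperB 1 rd 0 ([], [], [], []) := by
  rw [helperB1]
  congr 1
  funext st d1
  rw [helperB2]
  simp [putB]
  congr 1
  funext st d2
  rw [helperB3]
  simp [putB]
  congr 1
  funext st d3
  rw [helperB4]
  simp [putB]
  ring_nf

-- ===== VERDICT (by name: the statement is the Claim_ definition above) =====
theorem get_all_possible_multipliers_spec : Claim_equal_get_all_possible_multipliers := by
  intro rd _
  unfold Spec_get_all_possible_multipliers
  unfold get_all_possible_multipliers get_all_possible_multipliers_alt
  rw [fold_eq]
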